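-- pv_equiv track=rewrite | github.com/khs990704/Coding-Test | 프로그래머스/1/140108. 문자열 나누기/문자열 나누기.py | solution
-- ===== SOURCE A (Python) =====
-- def solution(s):
--     answer = 0
--     first = ''
--     f_cnt = 0
--     n_cnt = 0
--     for i in s:
--         if first == '':
--             f_cnt += 1
--             first = i
--             continue
--         if first == i:
--             f_cnt += 1
--         else:
--             n_cnt += 1
--         if f_cnt == n_cnt:
--             f_cnt = 0
--             n_cnt = 0
--             first = ''
--             answer += 1
--     if first != '':
--         answer += 1
--     return answer
-- ===== SOURCE B (Python) =====
-- def _split_chunk(t):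
--     """t is nonempty: return the part of t after its first balanced chunk
--     (the shortest prefix with equally many t[0]-chars and other chars),
--     or '' if no prefix of t balances."""
--     first = t[0]
--     bal = 0
--     for j, c in enumerate(t):
--         bal += 1 if c == first else -1
--         if bal == 0:
--             return t[j + 1:]
--     return ''
--
--
-- def solution(s):
--     answer = 0
--     t = s
--     while t:
--         t = _split_chunk(t)
--         answer += 1
--     return answer
-- ===== Notes on version B (the rewrite author's own statement) =====
-- stated objective: alternative
-- what changed: B decomposes the task into staged chunk splitting: a helper scans one balanced chunk and returns the remainder string, and an outer loop repeatedly splits and counts chunks, instead of A's flat single pass that threads two counters and a reference-character flag across chunk boundaries and patches a trailing incomplete chunk after the loop.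
import Mathlib
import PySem

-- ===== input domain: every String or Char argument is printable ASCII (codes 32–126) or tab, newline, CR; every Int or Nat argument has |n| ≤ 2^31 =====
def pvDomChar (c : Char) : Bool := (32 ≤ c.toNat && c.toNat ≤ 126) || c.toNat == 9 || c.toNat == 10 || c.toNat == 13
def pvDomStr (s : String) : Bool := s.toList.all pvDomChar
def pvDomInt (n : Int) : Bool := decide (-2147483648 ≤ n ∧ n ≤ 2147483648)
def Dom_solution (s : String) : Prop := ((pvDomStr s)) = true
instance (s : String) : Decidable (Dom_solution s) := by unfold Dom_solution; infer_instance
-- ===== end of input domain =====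

-- B replaces A's flat single pass (two counters and a reference-character flag
-- threaded across chunk boundaries, plus a post-loop trailing fix-up) by staged
-- chunk splitting: a helper scans one balanced chunk and returns the remainder,
-- and an outer loop repeatedly splits and counts (objective: alternative
-- decomposition; not faster — remainder slicing makes B costlier on big inputs).

-- ===== PORT A =====
-- the loop over s; Python's `first` is '' or a 1-char string: ported as Option Char
def solLoopA : List Char → Int → Option Char → Int → Int → Int
  | [], answer, first, _, _ => if first.isSome then answer + 1 else answer
  | i :: rest, answer, first, f_cnt, n_cnt =>
    match first with
    | none => solLoopA rest answer (some i) (f_cnt + 1) n_cnt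
    | some f =>
      let p := if f == i then (f_cnt + 1, n_cnt) else (f_cnt, n_cnt + 1)
      if p.1 == p.2 then solLoopA rest (answer + 1) none 0 0
      else solLoopA rest answer (some f) p.1 p.2

def solution (s : String) : Int := solLoopA s.toList 0 none 0 0

-- ===== PORT B =====
-- the `for j, c in enumerate(t)` scan of _split_chunk: running balance, returns
-- the remainder t[j+1:] once the balance hits zero, [] ('') if it never does
def scanChunkB (first : Char) (bal : Int) : List Char → List Char
  | [] => []
  | c :: rest =>
    let b := bal + (if c == first then 1 else -1)
    if b == 0 then rest else scanChunkB first b rest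

-- _split_chunk(t): first = t[0], scan t with balance 0
def splitChunkB (t : List Char) : List Char :=
  match t with
  | [] => []
  | f :: _ => scanChunkB f 0 t

lemma scanChunkB_length (first : Char) : ∀ (bal : Int) (l : List Char),
    (scanChunkB first bal l).length ≤ l.length := by
  intro bal l
  induction l generalizing bal with
  | nil => simp [scanChunkB]
  | cons c rest ih =>
    simp only [scanChunkB]
    split <;> split <;>
      first
        | exact Nat.le_succ _
        | exact le_trans (ih _) (Nat.le_succ _)

lemma splitChunkB_length (c : Char) (rest : List Char) :
    (splitChunkB (c :: rest)).length < (c :: rest).length := by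
  simpa [splitChunkB, scanChunkB] using
    Nat.lt_succ_of_le (by
      by_cases h : ((0 : Int) + (if c == c then 1 else -1)) == 0
      · simp at h
      · simpa [scanChunkB, h] using scanChunkB_length c _ rest)

-- the `while t:` loop of solution
def solLoopB (t : List Char) (answer : Int) : Int :=
  match t with
  | [] => answer
  | c :: rest => solLoopB (splitChunkB (c :: rest)) (answer + 1)
termination_by t.length
decreasing_by exact splitChunkB_length c rest

def solution_alt (s : String) : Int := solLoopB s.toList 0

-- ===== PRECONDITION & SPEC =====
def Spec_solution (s : String) (out : Int) : Prop := out = solution_alt s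
instance (s : String) (out : Int) : Decidable (Spec_solution s out) := by unfold Spec_solution; infer_instance

-- ===== CLAIM (what is proved, stated in full; the proofs are below) =====
def Claim_equal_solution : Prop := ∀ (s : String), Dom_solution s → Spec_solution s (solution s)

-- ===== LEMMAS AND PROOFS =====
-- Within one open group, A's pair (f_cnt, n_cnt) carries exactly the balance
-- f_cnt - n_cnt of B's scan: the group closes (f_cnt = n_cnt) iff the balance
-- hits zero, and then A restarts on precisely the remainder B's scan returns;
-- if the list ends mid-group, A adds its trailing +1 and B's scan returns [],
-- costing B one final loop iteration — the same +1.
lemma loopA_scan : ∀ (l : List Char) (a : Int) (ch : Char) (f n : Int),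
    solLoopA l a (some ch) f n =
      solLoopA (scanChunkB ch (f - n) l) (a + 1) none 0 0 := by
  intro l
  induction l with
  | nil => intro a ch f n; simp [solLoopA, scanChunkB]
  | cons c rest ih =>
    intro a ch f n
    by_cases hc : ch = c
    · subst hc
      by_cases hz : (f + 1 : Int) = n
      · simp [solLoopA, scanChunkB, show ((f - n + 1 : Int) = 0) from by omega, hz]
      · have h1 : ((f + 1 : Int) == n) = false := by simp [hz]
        have h2 : ((f - n + 1 : Int) == 0) = false := by
          simp only [beq_eq_false_iff_ne, ne_eq]; omega
        simp only [solLoopA, scanChunkB, beq_self_eq_true, if_true, h1,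
          Bool.false_eq_true, if_false, h2]
        have := ih a ch (f + 1) n
        rw [this]; congr 2; omega
    · have h1 : (ch == c) = false := by simp [hc]
      have h1' : (c == ch) = false := by simp [Ne.symm hc]
      by_cases hz : f = (n + 1 : Int)
      · simp [solLoopA, scanChunkB, h1, h1', hz]
      · have h2 : ((f : Int) == n + 1) = false := by simp [hz]
        have h3 : ((f - n + -1 : Int) == 0) = false := by
          simp only [beq_eq_false_iff_ne, ne_eq]; omega
        simp only [solLoopA, scanChunkB, h1, h1', Bool.false_eq_true, if_false, h2, h3]
        have := ih a ch f (n + 1)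
        rw [this]; congr 2; omega

-- main equivalence, strong induction on the length of the remaining list
lemma loop_eq : ∀ (k : Nat) (l : List Char), l.length ≤ k → ∀ (a : Int),
    solLoopA l a none 0 0 = solLoopB l a := by
  intro k
  induction k with
  | zero =>
    intro l hl a
    have : l = [] := List.eq_nil_of_length_eq_zero (Nat.le_zero.mp hl)
    subst this; simp [solLoopA, solLoopB]
  | succ k ih =>
    intro l hl a
    match l with
    | [] => simp [solLoopA, solLoopB]
    | c :: rest =>
      have hstep : solLoopA (c :: rest) a none 0 0 =
          solLoopA (splitChunkB (c :: rest)) (a + 1) none 0 0 := by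
        have := loopA_scan rest a c 1 0
        simpa [solLoopA, splitChunkB, scanChunkB] using this
      rw [hstep, ih _ (by
        have := splitChunkB_length c rest
        simp only [List.length_cons] at hl this
        omega)]
      conv_rhs => rw [solLoopB]

-- ===== VERDICT (by name: the statement is the Claim_ definition above) =====
theorem solution_spec : Claim_equal_solution := by
  intro s _
  show solution s = solution_alt s
  exact loop_eq s.toList.length s.toList le_rfl 0
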